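-- pv_equiv track=rewrite | github.com/elliesolhjou/LeetCode | assignment3.py | largeSum
-- ===== SOURCE A (Python) =====
-- def largeSum(arr, target):
--     max_length=0
--     for  i in range(len(arr)):
--         cur_sum = arr[i]
--         for j in range(i+1, len(arr)):
--             cur_sum+=arr[j]
--             if cur_sum == target:
--                 max_length = max(max_length, j-i+1)
--
--     return max_length
-- ===== SOURCE B (Python) =====
-- def largeSum(arr, target):
--     # O(n): prefix sums with a dict of the first index at which each prefix value occurs.
--     first = {0: 0}
--     s = 0
--     best = 0
--     for j, x in enumerate(arr, 1):
--         s += x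
--         i = first.get(s - target)
--         if i is not None and j - i >= 2:
--             best = max(best, j - i)
--         if s not in first:
--             first[s] = j
--     return best
-- ===== Notes on version B (the rewrite author's own statement) =====
-- stated objective: faster
-- what changed: Replaced the quadratic enumeration of all subarray sums by a single left-to-right pass over prefix sums with a dict mapping each prefix value to its first index, looking up prefix-target at each position and excluding length-1 subarrays.
import Mathlib
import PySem

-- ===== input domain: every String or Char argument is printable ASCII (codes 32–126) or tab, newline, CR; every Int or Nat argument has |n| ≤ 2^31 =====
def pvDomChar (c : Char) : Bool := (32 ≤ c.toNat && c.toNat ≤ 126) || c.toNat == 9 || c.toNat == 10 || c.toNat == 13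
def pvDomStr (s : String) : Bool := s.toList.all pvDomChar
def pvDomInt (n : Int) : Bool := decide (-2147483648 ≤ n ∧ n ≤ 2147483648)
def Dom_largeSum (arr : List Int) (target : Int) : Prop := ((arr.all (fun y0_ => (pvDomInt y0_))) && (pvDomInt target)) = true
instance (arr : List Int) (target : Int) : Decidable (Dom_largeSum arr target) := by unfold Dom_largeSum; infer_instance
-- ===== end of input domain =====

-- B replaces A's quadratic all-subarray scan by one prefix-sum pass with a first-occurrence dict (asymptotically faster).


-- ===== PORT A =====
-- arr[i] / arr[j]: the indices come from range(len(arr)), hence are always in range, so pyGetD with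
-- dummy default 0 is exact here.
def largeSum (arr : List Int) (target : Int) : Int :=
  (PySem.List.pyRange 0 (arr.length : Int) 1).foldl
    (fun max_length i =>
      ((PySem.List.pyRange (i + 1) (arr.length : Int) 1).foldl
          (fun (st : Int × Int) j =>
            (st.1 + PySem.List.pyGetD arr j 0,
             if st.1 + PySem.List.pyGetD arr j 0 = target then max st.2 (j - i + 1) else st.2))
          (PySem.List.pyGetD arr i 0, max_length)).2)
    0

-- ===== PORT B =====
-- loop body of B: state is (first, s, best, j)
def largeSumAltStep (target : Int) (st : PySem.Dict Int Int × Int × Int × Int) (x : Int) :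
    PySem.Dict Int Int × Int × Int × Int :=
  let s := st.2.1 + x
  let j := st.2.2.2 + 1
  let best :=
    match st.1.get? (s - target) with
    | some i => if 2 ≤ j - i then max st.2.2.1 (j - i) else st.2.2.1
    | none => st.2.2.1
  (if st.1.contains s then st.1 else st.1.insert s j, s, best, j)

def largeSum_alt (arr : List Int) (target : Int) : Int :=
  (arr.foldl (largeSumAltStep target)
      (PySem.Dict.ofList [((0 : Int), (0 : Int))], 0, 0, 0)).2.2.1

-- ===== PRECONDITION & SPEC =====
def Spec_largeSum (arr : List Int) (target : Int) (out : Int) : Prop := out = largeSum_alt arr target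
instance (arr : List Int) (target : Int) (out : Int) : Decidable (Spec_largeSum arr target out) := by unfold Spec_largeSum; infer_instance

-- ===== CLAIM (what is proved, stated in full; the proofs are below) =====
def Claim_equal_largeSum : Prop := ∀ (arr : List Int) (target : Int), Dom_largeSum arr target → Spec_largeSum arr target (largeSum arr target)

-- ===== LEMMAS AND PROOFS =====

-- prefix sum of the first k elements
def pvP (arr : List Int) (k : Nat) : Int := (arr.take k).sum

-- contribution of the pair (i, j) (start index i, exclusive end index j) to the running maximum
def pvStep (arr : List Int) (target : Int) (m : Int) (p : Nat × Nat) : Int :=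
  if pvP arr p.2 - pvP arr p.1 = target then max m ((p.2 : Int) - (p.1 : Int)) else m

-- B's per-end-index contribution: look at the FIRST i < j with prefix(i) = prefix(j) - target
def pvG (arr : List Int) (target : Int) (m : Int) (j : Nat) : Int :=
  match (List.range j).find? (fun i => pvP arr i = pvP arr j - target) with
  | some i0 => if i0 + 2 ≤ j then max m ((j : Int) - (i0 : Int)) else m
  | none => m

def pvFA (arr : List Int) (target : Int) : Int :=
  (List.range arr.length).foldl
    (fun m i => (List.range' (i+2) (arr.length - (i+1))).foldl (fun m j => pvStep arr target m (i, j)) m) 0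

def pvFB (arr : List Int) (target : Int) : Int :=
  (List.range' 1 arr.length).foldl (pvG arr target) 0

def pvPairsA (n : Nat) : List (Nat × Nat) :=
  (List.range n).flatMap (fun i => (List.range' (i+2) (n - (i+1))).map (fun j => (i, j)))

def pvPairsB (n : Nat) : List (Nat × Nat) :=
  (List.range' 1 n).flatMap (fun j => (List.range (j-1)).map (fun i => (i, j)))

lemma pvP_succ (arr : List Int) (k : Nat) (h : k < arr.length) :
    pvP arr (k+1) = pvP arr k + arr.getD k 0 := by
  unfold pvP
  rw [List.take_succ_eq_append_getElem h, List.sum_append, List.getD_eq_getElem?_getD,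
    List.getElem?_eq_getElem h]
  simp

lemma pv_innerA (arr : List Int) (target : Int) (i : Nat) :
    ∀ (b a : Nat) (c m : Int), i + 1 + a + b ≤ arr.length →
    c = pvP arr (i+1+a) - pvP arr i →
    ((List.range' a b).foldl
       (fun (st : Int × Int) (t : Nat) =>
         (st.1 + PySem.List.pyGetD arr ((i:Int) + 1 + (t:Int)) 0,
          if st.1 + PySem.List.pyGetD arr ((i:Int) + 1 + (t:Int)) 0 = target
          then max st.2 ((i:Int) + 1 + (t:Int) - (i:Int) + 1) else st.2))
       (c, m)).2
    = (List.range' (i+2+a) b).foldl (fun m j => pvStep arr target m (i, j)) m := by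
  intro b
  induction b with
  | zero => intro a c m _ _; simp
  | succ b ih =>
    intro a c m hlen hc
    rw [List.range'_succ, List.range'_succ]
    simp only [List.foldl_cons]
    have hidx : (i:Int) + 1 + (a:Int) = ((i+1+a : Nat) : Int) := by push_cast; ring
    have hlt : i+1+a < arr.length := by omega
    have hget : PySem.List.pyGetD arr ((i:Int) + 1 + (a:Int)) 0 = arr.getD (i+1+a) 0 := by
      rw [hidx, PySem.List.pyGetD_natCast]
    have hcur : c + PySem.List.pyGetD arr ((i:Int) + 1 + (a:Int)) 0
        = pvP arr (i+1+(a+1)) - pvP arr i := by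
      rw [hget, hc]
      have : i+1+(a+1) = (i+1+a)+1 := by omega
      rw [this, pvP_succ arr _ hlt]; ring
    have hval : (i:Int) + 1 + (a:Int) - (i:Int) + 1 = ((i+2+a : Nat) : Int) - ((i : Nat) : Int) := by
      push_cast; ring
    have hstep : ((c + PySem.List.pyGetD arr ((i:Int) + 1 + (a:Int)) 0 : Int),
          (if c + PySem.List.pyGetD arr ((i:Int) + 1 + (a:Int)) 0 = target
          then max m ((i:Int) + 1 + (a:Int) - (i:Int) + 1) else m : Int))
        = (pvP arr (i+1+(a+1)) - pvP arr i,
           pvStep arr target m (i, i+2+a)) := by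
      simp only [hcur, pvStep, hval]
      have h2 : i+1+(a+1) = i+2+a := by omega
      rw [h2]
    rw [hstep]
    have h3 : i+2+(a+1) = i+2+a+1 := by omega
    rw [ih (a+1) _ _ (by omega) rfl, h3]

lemma pv_A_eq_fA (arr : List Int) (target : Int) : largeSum arr target = pvFA arr target := by
  unfold largeSum pvFA
  rw [PySem.List.pyRange_one, List.foldl_map]
  have hn : (((arr.length : Int)) - 0).toNat = arr.length := by omega
  rw [hn]
  apply PySem.List.foldl_congr_mem
  intro m i hi
  rw [List.mem_range] at hi
  simp only [zero_add]
  rw [PySem.List.pyRange_one, List.foldl_map]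
  have hb : (((arr.length : Int)) - ((i : Int) + 1)).toNat = arr.length - (i+1) := by omega
  rw [hb]
  have hc : PySem.List.pyGetD arr (i : Int) 0 = pvP arr (i+1+0) - pvP arr i := by
    rw [PySem.List.pyGetD_natCast, pvP_succ arr i hi]; ring
  rw [List.range_eq_range']
  have := pv_innerA arr target i (arr.length - (i+1)) 0 (PySem.List.pyGetD arr (i : Int) 0) m
    (by omega) hc
  simpa using this

lemma pv_foldFirst (g : Nat → Int) (v c : Int) :
    ∀ (l : List Nat), l.Pairwise (· ≤ ·) → ∀ m : Int,
    l.foldl (fun m i => if g i = v then max m (c - (i:Int)) else m) m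
    = (match l.find? (fun i => g i = v) with
       | some i0 => max m (c - (i0:Int))
       | none => m) := by
  intro l
  induction l with
  | nil => intro _ m; simp
  | cons i rest ih =>
    intro hp m
    rw [List.pairwise_cons] at hp
    simp only [List.foldl_cons, List.find?_cons]
    by_cases hgi : g i = v
    · simp only [hgi, decide_true]
      rw [ih hp.2]
      cases hfind : rest.find? (fun i => g i = v) with
      | none => rfl
      | some i1 =>
        have hmem := List.mem_of_find?_eq_some hfind
        have hle : i ≤ i1 := hp.1 i1 hmem
        have : c - (i1 : Int) ≤ c - (i : Int) := by
          have : (i : Int) ≤ (i1 : Int) := by exact_mod_cast hle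
          omega
        simp only [if_true]
        exact max_eq_left (le_trans this (le_max_right _ _))
    · simp only [hgi, decide_false]
      exact ih hp.2 m

lemma pv_G_eq_fold (arr : List Int) (target : Int) (j : Nat) (hj : 1 ≤ j) (m : Int) :
    (List.range (j-1)).foldl (fun m i => pvStep arr target m (i, j)) m = pvG arr target m j := by
  have hcongr : (List.range (j-1)).foldl (fun m i => pvStep arr target m (i, j)) m
      = (List.range (j-1)).foldl
          (fun m i => if pvP arr i = pvP arr j - target then max m ((j:Int) - (i:Int)) else m) m := by
    apply PySem.List.foldl_congr_mem
    intro acc i _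
    unfold pvStep
    by_cases h : pvP arr j - pvP arr i = target
    · rw [if_pos h, if_pos (by omega)]
    · rw [if_neg h, if_neg (by omega)]
  rw [hcongr,
    pv_foldFirst (fun i => pvP arr i) (pvP arr j - target) ((j:Int)) (List.range (j-1))
      (List.pairwise_lt_range.imp le_of_lt) m]
  unfold pvG
  have hsplit : List.range j = List.range (j-1) ++ [j-1] := by
    conv_lhs => rw [show j = (j-1)+1 by omega]
    exact List.range_succ
  rw [hsplit, List.find?_append]
  cases hpre : (List.range (j-1)).find? (fun i => decide (pvP arr i = pvP arr j - target)) with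
  | some i0 =>
      have hi0 : i0 ∈ List.range (j-1) := List.mem_of_find?_eq_some hpre
      rw [List.mem_range] at hi0
      simp only [Option.some_or]
      rw [if_pos (by omega)]
  | none =>
      simp only [Option.none_or, List.find?_cons, List.find?_nil]
      by_cases hl : pvP arr (j-1) = pvP arr j - target
      · simp only [hl, decide_true]
        rw [if_neg (by omega)]
      · simp only [hl, decide_false]

lemma pv_B_inv (arr : List Int) (target : Int) :
    ∀ (l pre : List Int), arr = pre ++ l →
    ∀ (D : PySem.Dict Int Int) (m : Int),
    (∀ v, D.get? v = ((List.range (pre.length+1)).find? (fun i => pvP arr i = v)).map (fun i => (i : Int))) →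
    (l.foldl (largeSumAltStep target) (D, pre.sum, m, (pre.length : Int))).2.2.1
    = (List.range' (pre.length+1) l.length).foldl (pvG arr target) m := by
  intro l
  induction l with
  | nil => intro pre h D m hD; simp
  | cons x l ih =>
    intro pre h D m hD
    have hlen : arr.length = pre.length + 1 + l.length := by rw [h]; simp; omega
    have hs : pre.sum + x = pvP arr (pre.length+1) := by
      unfold pvP
      rw [h, List.take_append, List.take_of_length_le (by omega),
        Nat.add_sub_cancel_left, List.sum_append]
      simp
    have hj : (pre.length : Int) + 1 = ((pre.length + 1 : Nat) : Int) := by push_cast; ring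
    -- the predicate over prefix values
    set q : Nat → Bool := fun i => decide (pvP arr i = pvP arr (pre.length+1) - target) with hq
    have hbest : (match D.get? (pvP arr (pre.length+1) - target) with
        | some i => if 2 ≤ (pre.length:Int) + 1 - i
                    then max m ((pre.length:Int) + 1 - i) else m
        | none => m) = pvG arr target m (pre.length+1) := by
      rw [hD, pvG]
      cases hf : (List.range (pre.length+1)).find? q with
      | none => rfl
      | some i0 =>
        show (if 2 ≤ (pre.length:Int) + 1 - (i0:Int)
              then max m ((pre.length:Int) + 1 - (i0:Int)) else m)
            = (if i0 + 2 ≤ pre.length + 1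
               then max m (((pre.length + 1 : Nat) : Int) - (i0:Int)) else m)
        by_cases hcond : i0 + 2 ≤ pre.length + 1
        · rw [if_pos (by omega), if_pos hcond]
          push_cast; ring_nf
        · rw [if_neg (by omega), if_neg hcond]
    -- the updated dict still maps each prefix value to its first index
    have hD' : ∀ v, (if D.contains (pvP arr (pre.length+1))
          then D else D.insert (pvP arr (pre.length+1)) ((pre.length:Int) + 1)).get? v
        = ((List.range (pre.length+2)).find? (fun i => decide (pvP arr i = v))).map
            (fun i => (i : Int)) := by
      intro v
      have hrange : List.range (pre.length+2) = List.range (pre.length+1) ++ [pre.length+1] :=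
        List.range_succ
      rw [hrange, List.find?_append]
      by_cases hc : D.contains (pvP arr (pre.length+1)) = true
      · rw [if_pos hc]
        cases hfv : (List.range (pre.length+1)).find? (fun i => decide (pvP arr i = v)) with
        | some i0 => rw [hD v, hfv]; rfl
        | none =>
          have hvne : v ≠ pvP arr (pre.length+1) := by
            intro hv
            rw [PySem.Dict.contains_eq_isSome_get?, hD] at hc
            rw [hv] at hfv
            rw [hfv] at hc
            simp at hc
          have hdec : (decide (pvP arr (pre.length+1) = v)) = false := by
            simp only [decide_eq_false_iff_not]
            exact fun hh => hvne hh.symm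
          simp only [Option.none_or, List.find?_cons, hdec, List.find?_nil]
          rw [hD v, hfv]
      · rw [if_neg hc]
        have hget : D.get? (pvP arr (pre.length+1)) = none := by
          rw [PySem.Dict.contains_eq_isSome_get?] at hc
          cases hgg : D.get? (pvP arr (pre.length+1)) with
          | none => rfl
          | some w => rw [hgg] at hc; simp at hc
        have hfnone : (List.range (pre.length+1)).find?
            (fun i => decide (pvP arr i = pvP arr (pre.length+1))) = none := by
          have := hD (pvP arr (pre.length+1))
          rw [hget] at this
          cases hff : (List.range (pre.length+1)).find?
              (fun i => decide (pvP arr i = pvP arr (pre.length+1))) with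
          | none => rfl
          | some w => rw [hff] at this; simp at this
        rw [PySem.Dict.get?_insert]
        by_cases hv : v = pvP arr (pre.length+1)
        · rw [if_pos hv, hv, hfnone]
          simp only [Option.none_or, List.find?_cons, List.find?_nil]
          rw [hj]
          rfl
        · rw [if_neg hv, hD v]
          cases hfv : (List.range (pre.length+1)).find? (fun i => decide (pvP arr i = v)) with
          | some i0 => rfl
          | none =>
            have hdec : (decide (pvP arr (pre.length+1) = v)) = false := by
              simp only [decide_eq_false_iff_not]
              exact fun hh => hv hh.symm
            simp only [Option.none_or, List.find?_cons, hdec, List.find?_nil]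
    simp only [List.foldl_cons, largeSumAltStep, hs]
    rw [hbest, hj]
    have harr : arr = (pre ++ [x]) ++ l := by rw [h]; simp
    have hDfix : ∀ v, (if D.contains (pvP arr (pre.length+1))
          then D else D.insert (pvP arr (pre.length+1)) ((pre.length:Int) + 1)).get? v
        = ((List.range ((pre ++ [x]).length + 1)).find? (fun i => decide (pvP arr i = v))).map
            (fun i => (i : Int)) := by
      intro v
      rw [hD' v]
      congr 1
      simp
    have hmain := ih (pre ++ [x]) harr _ (pvG arr target m (pre.length+1)) hDfix
    have hsum' : (pre ++ [x]).sum = pvP arr (pre.length+1) := by rw [← hs]; simp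
    have hlen' : (pre ++ [x]).length = pre.length + 1 := by simp
    rw [hsum', hlen', hj] at hmain
    rw [hmain]
    simp only [List.length_cons]
    rw [List.range'_succ, List.foldl_cons]

lemma pv_B_eq_fB (arr : List Int) (target : Int) : largeSum_alt arr target = pvFB arr target := by
  unfold largeSum_alt pvFB
  have hD : ∀ v : Int, (PySem.Dict.ofList [((0 : Int), (0 : Int))]).get? v
      = ((List.range 1).find? (fun i => decide (pvP arr i = v))).map (fun i => (i : Int)) := by
    intro v
    by_cases hv : v = 0
    · subst hv; rfl
    · have h1 : (PySem.Dict.ofList [((0 : Int), (0 : Int))]).get? v = none := by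
        rw [show PySem.Dict.ofList [((0 : Int), (0 : Int))]
            = PySem.Dict.mk [((0 : Int), (0 : Int))] from rfl, PySem.Dict.get?_mk_cons]
        rw [if_neg (by simpa using (fun hh => hv hh.symm))]
        rfl
      have h2 : (decide (pvP arr 0 = v)) = false := by
        simp only [decide_eq_false_iff_not]
        intro hh
        exact hv (by simpa [pvP] using hh.symm)
      rw [h1]
      simp [List.range_succ, h2]
  have := pv_B_inv arr target arr [] rfl (PySem.Dict.ofList [((0 : Int), (0 : Int))]) 0
    (by simpa using hD)
  simpa using this

lemma pv_fA_pairs (arr : List Int) (target : Int) :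
    pvFA arr target = (pvPairsA arr.length).foldl (pvStep arr target) 0 := by
  unfold pvFA pvPairsA
  rw [List.foldl_flatMap]
  simp only [List.foldl_map]

lemma pv_fB_pairs (arr : List Int) (target : Int) :
    pvFB arr target = (pvPairsB arr.length).foldl (pvStep arr target) 0 := by
  unfold pvFB pvPairsB
  rw [List.foldl_flatMap]
  apply PySem.List.foldl_congr_mem
  intro m j hjmem
  have h1 : 1 ≤ j := (List.mem_range'_1.mp hjmem).1
  rw [List.foldl_map]
  exact (pv_G_eq_fold arr target j h1 m).symm

lemma pv_pairs_perm (n : Nat) : (pvPairsA n).Perm (pvPairsB n) := by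
  apply List.perm_of_nodup_nodup_toFinset_eq
  · unfold pvPairsA
    rw [List.nodup_flatMap]
    constructor
    · intro i _
      exact List.Nodup.map (fun a b hab => congrArg Prod.snd hab)
        ((List.pairwise_lt_range').imp ne_of_lt)
    · refine List.pairwise_lt_range.imp ?_
      intro a b hab p hpa hpb
      rw [List.mem_map] at hpa hpb
      obtain ⟨j1, _, hj1⟩ := hpa
      obtain ⟨j2, _, hj2⟩ := hpb
      have h1 := congrArg Prod.fst hj1
      have h2 := congrArg Prod.fst hj2
      simp at h1 h2
      omega
  · unfold pvPairsB
    rw [List.nodup_flatMap]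
    constructor
    · intro j _
      exact List.Nodup.map (fun a b hab => congrArg Prod.fst hab) List.nodup_range
    · refine ((List.pairwise_lt_range').imp ?_)
      intro a b hab p hpa hpb
      rw [List.mem_map] at hpa hpb
      obtain ⟨j1, _, hj1⟩ := hpa
      obtain ⟨j2, _, hj2⟩ := hpb
      have h1 := congrArg Prod.snd hj1
      have h2 := congrArg Prod.snd hj2
      simp at h1 h2
      omega
  · apply Finset.ext
    rintro ⟨a, b⟩
    simp only [pvPairsA, pvPairsB, List.mem_toFinset, List.mem_flatMap, List.mem_map,
      List.mem_range, List.mem_range'_1, Prod.mk.injEq]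
    constructor
    · rintro ⟨i, hi, j, hj, hia, hjb⟩
      subst hia; subst hjb
      exact ⟨j, by omega, i, by omega, rfl, rfl⟩
    · rintro ⟨j, hj, i, hi, hia, hjb⟩
      subst hia; subst hjb
      exact ⟨i, by omega, j, by omega, rfl, rfl⟩

theorem largeSum_spec : Claim_equal_largeSum := by
  intro arr target _
  unfold Spec_largeSum
  rw [pv_A_eq_fA, pv_B_eq_fB, pv_fA_pairs, pv_fB_pairs]
  refine List.Perm.foldl_eq' (pv_pairs_perm arr.length) ?_ 0
  intro x _ y _ z
  unfold pvStep
  split_ifs <;> omega
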